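-- pv_equiv track=rewrite | github.com/qwerty-loops/CodePath | Week 3/TUE_SP_1_SET_1/prob5.py | clean_post
-- ===== SOURCE A (Python) =====
-- def clean_post(post):
--     post=post.lower()
--     new_str=[]
--     if post=="":
--         return ""
--     else:
--         for ch in post:
--             if ch not in new_str:
--                 new_str.append(ch)
--             elif ch.lower() in new_str:
--                 new_str.remove(ch)
--         return "".join(new_str)
-- ===== SOURCE B (Python) =====
-- def clean_post(post):
--     s = list(post.lower())
--     cnt = {}
--     for ch in s:
--         cnt[ch] = cnt.get(ch, 0) + 1
--     last = {}
--     for i, ch in enumerate(s):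
--         last[ch] = i
--     return "".join(ch for i, ch in enumerate(s)
--                    if cnt[ch] % 2 == 1 and last[ch] == i)
-- ===== Notes on version B (the rewrite author's own statement) =====
-- stated objective: alternative
-- what changed: A simulates the toggle with a mutable list (append on first sight, remove on second); B builds count and last-index dictionaries in linear passes and keeps a character exactly at its last occurrence when its total count in the lowercased string is odd.
import Mathlib
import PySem

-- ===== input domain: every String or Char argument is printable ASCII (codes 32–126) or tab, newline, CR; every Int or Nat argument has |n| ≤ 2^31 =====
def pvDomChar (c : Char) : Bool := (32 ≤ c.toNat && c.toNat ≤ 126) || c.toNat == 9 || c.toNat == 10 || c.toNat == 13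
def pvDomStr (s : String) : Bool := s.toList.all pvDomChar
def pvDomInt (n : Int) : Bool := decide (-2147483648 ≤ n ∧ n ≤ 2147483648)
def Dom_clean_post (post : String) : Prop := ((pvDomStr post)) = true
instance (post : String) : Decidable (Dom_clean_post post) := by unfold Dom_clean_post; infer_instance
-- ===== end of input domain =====

-- B replaces A's append/remove toggle simulation by dictionaries of counts and last indices
-- built in linear passes: keep a character exactly at its last occurrence when its count is odd
-- (objective: alternative decomposition, no mutation of an accumulator list).

-- ===== PORT A =====
-- one loop step of A's for-loop: toggle ch in the accumulator list
def pvStep (st : List Char) (ch : Char) : List Char :=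
  if !(st.contains ch) then st ++ [ch]
  else if st.contains (PySem.Chars.lowerChar ch) then (PySem.List.remove? st ch).getD st
  else st

def clean_post (post : String) : String :=
  let p := PySem.Str.lower post
  if p == "" then ""
  else String.ofList (p.toList.foldl pvStep [])

-- ===== PORT B =====
-- cnt[ch] = cnt.get(ch, 0) + 1 over s
def pvCnt (s : List Char) : PySem.Dict Char Int :=
  s.foldl (fun d ch => d.insert ch (d.getD ch 0 + 1)) PySem.Dict.empty

-- last[ch] = i over enumerate(s)
def pvLast (s : List Char) : PySem.Dict Char Int :=
  (PySem.List.enumerate s 0).foldl (fun d ic => d.insert ic.2 ic.1) PySem.Dict.empty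

-- B's comprehension test: cnt[ch] % 2 == 1 and last[ch] == i
-- (cnt[ch] / last[ch] are exact lookups in Python; the key is always present where they
-- are read, so getD with a default is exact there)
def pvKeep (cnt last : PySem.Dict Char Int) (i : Int) (ch : Char) : Bool :=
  (PySem.Int.mod (cnt.getD ch 0) 2 == 1) && (last.getD ch 0 == i)

def clean_post_alt (post : String) : String :=
  let s := (PySem.Str.lower post).toList
  let cnt := pvCnt s
  let last := pvLast s
  String.ofList (((PySem.List.enumerate s 0).filter (fun ic => pvKeep cnt last ic.1 ic.2)).map (·.2))

-- ===== PRECONDITION & SPEC =====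
def Spec_clean_post (post : String) (out : String) : Prop := out = clean_post_alt post
instance (post : String) (out : String) : Decidable (Spec_clean_post post out) := by unfold Spec_clean_post; infer_instance

-- ===== CLAIM (what is proved, stated in full; the proofs are below) =====
def Claim_equal_clean_post : Prop := ∀ (post : String), Dom_clean_post post → Spec_clean_post post (clean_post post)

-- ===== LEMMAS AND PROOFS =====

theorem lowerChar_idem (c : Char) : PySem.Chars.lowerChar (PySem.Chars.lowerChar c) = PySem.Chars.lowerChar c := by
  unfold PySem.Chars.lowerChar PySem.Chars.isupper
  split_ifs with h1 h2
  · exfalso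
    simp only [Bool.and_eq_true, decide_eq_true_eq, Char.le_def] at h1 h2
    have a1 := UInt32.le_iff_toNat_le.mp h1.1
    have a2 := UInt32.le_iff_toNat_le.mp h1.2
    have eA : ('A').val.toNat = 65 := rfl
    have eZ : ('Z').val.toNat = 90 := rfl
    have ec : c.toNat = c.val.toNat := rfl
    have hv : Nat.isValidChar (c.toNat + 32) := by left; omega
    have hofs : (Char.ofNat (c.toNat + 32)).val.toNat = c.toNat + 32 := by
      rw [Char.ofNat, dif_pos hv]; rfl
    have b1 := UInt32.le_iff_toNat_le.mp h2.2
    rw [hofs] at b1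
    omega
  · rfl
  · rfl

-- B's kept list, as a function of the (already lowered) character list
def pvG (l : List Char) : List Char :=
  ((PySem.List.enumerate l 0).filter (fun ic => pvKeep (pvCnt l) (pvLast l) ic.1 ic.2)).map (·.2)

theorem pvCnt_getD (l : List Char) (c : Char) : (pvCnt l).getD c 0 = (l.count c : Int) := by
  unfold pvCnt
  rw [PySem.Dict.getD_foldl_insert_add_one]
  simp [pysem]

theorem pvLast_append (l : List Char) (d : Char) :
    pvLast (l ++ [d]) = (pvLast l).insert d ((l.length : Int)) := by
  unfold pvLast
  rw [PySem.List.enumerate_append, List.foldl_append, PySem.List.enumerate_cons,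
    PySem.List.enumerate_nil]
  simp

theorem drop_append_char (l : List Char) (c : Char) (k : Nat) (hk : k < l.length) :
    (l ++ [c]).drop (k + 1) = l.drop (k + 1) ++ [c] := by
  rw [List.drop_append_of_le_length (by omega)]

theorem pvLast_getD_eq (l : List Char) (k : Nat) (c : Char) (hk : k < l.length)
    (hc : l[k] = c) : ((pvLast l).getD c 0 == (k : Int)) = !((l.drop (k + 1)).contains c) := by
  induction l using List.reverseRecOn generalizing k with
  | nil => simp at hk
  | append_singleton l d ih =>
    rw [pvLast_append, PySem.Dict.getD_insert]
    by_cases hkl : k = l.length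
    · subst hkl
      have hcd : c = d := by simpa using hc.symm
      have hdrop : (l ++ [d]).drop (l.length + 1) = [] := by
        apply List.drop_eq_nil_of_le; simp
      simp [hcd, hdrop]
    · have hk' : k < l.length := by
        have := hk; simp at this; omega
      rw [List.getElem_append_left hk'] at hc
      rw [drop_append_char l d k hk']
      by_cases hcd : c = d
      · have hne : ¬ ((l.length : Int) = (k : Int)) := by
          intro hq; apply hkl; omega
        simp [hcd, hne]
      · rw [if_neg hcd, ih k hk' hc]
        simp only [List.contains_append]
        simp
        exact fun _ => hcd

-- the bridge: B's dictionary test at position k is "odd count and no later occurrence"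
theorem pvKeep_natCast (l : List Char) (k : Nat) (c : Char) (hk : k < l.length)
    (hc : l[k] = c) :
    pvKeep (pvCnt l) (pvLast l) ((k : Int)) c
      = ((l.count c % 2 == 1) && !((l.drop (k + 1)).contains c)) := by
  unfold pvKeep
  rw [pvCnt_getD, pvLast_getD_eq l k c hk hc,
    PySem.Int.mod_eq_emod_of_pos (by omega : (0:Int) < 2)]
  congr 1
  have hcast : ((l.count c : Int)) % 2 = ((l.count c % 2 : Nat) : Int) := by omega
  rcases Nat.mod_two_eq_zero_or_one (l.count c) with h | h <;> rw [hcast, h] <;> rfl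

-- last-occurrence existence
theorem exists_last (l : List Char) (c : Char) (hc : c ∈ l) :
    ∃ k, ∃ _ : k < l.length, l[k] = c ∧ c ∉ l.drop (k + 1) := by
  induction l using List.reverseRecOn with
  | nil => simp at hc
  | append_singleton l d ih =>
    by_cases hdc : d = c
    · refine ⟨l.length, by simp, ?_, by simp⟩
      simp [hdc]
    · have hcl : c ∈ l := by
        rcases List.mem_append.mp hc with h | h
        · exact h
        · simp at h; exact absurd h.symm hdc
      rcases ih hcl with ⟨k, hk, hget, hnd⟩
      refine ⟨k, by simp; omega, ?_, ?_⟩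
      · rw [List.getElem_append_left hk]; exact hget
      · rw [drop_append_char l d k hk]
        simp [hnd, Ne.symm hdc]

-- membership in pvG ↔ odd count
theorem mem_pvG_iff (l : List Char) (c : Char) : c ∈ pvG l ↔ l.count c % 2 = 1 := by
  constructor
  · intro h
    rcases List.mem_map.mp h with ⟨ic, hmem, hsnd⟩
    rcases List.mem_filter.mp hmem with ⟨hin, hkeep⟩
    rcases (PySem.List.mem_enumerate_iff _ _ _).mp hin with ⟨k, hk, rfl⟩
    simp only at hsnd
    subst hsnd
    rw [show (0 : Int) + (k : Int) = (k : Int) by omega, pvKeep_natCast l k _ hk rfl] at hkeep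
    have := (Bool.and_eq_true _ _).mp hkeep
    simpa using this.1
  · intro hodd
    have hcl : c ∈ l := List.count_pos_iff.mp (by omega)
    rcases exists_last l c hcl with ⟨k, hk, hget, hnd⟩
    refine List.mem_map.mpr ⟨((0 : Int) + (k : Int), l[k]), ?_, by simpa using hget⟩
    refine List.mem_filter.mpr ⟨(PySem.List.mem_enumerate_iff _ _ _).mpr ⟨k, hk, rfl⟩, ?_⟩
    simp only
    rw [show (0 : Int) + (k : Int) = (k : Int) by omega, pvKeep_natCast l k _ hk rfl, hget]
    simp [hodd, hnd]

theorem pvG_nodup (l : List Char) : (pvG l).Nodup := by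
  unfold pvG
  rw [List.nodup_iff_pairwise_ne, List.pairwise_map]
  have hp : ((PySem.List.enumerate l 0).filter
      (fun ic => pvKeep (pvCnt l) (pvLast l) ic.1 ic.2)).Pairwise
      (fun p q => p.1 < q.1) := (PySem.List.pairwise_lt_enumerate l 0).filter _
  refine hp.imp_of_mem ?_
  intro a b ha hb hlt
  rcases List.mem_filter.mp ha with ⟨hain, hak⟩
  rcases List.mem_filter.mp hb with ⟨hbin, hbk⟩
  rcases (PySem.List.mem_enumerate_iff _ _ _).mp hain with ⟨ka, hka, rfl⟩
  rcases (PySem.List.mem_enumerate_iff _ _ _).mp hbin with ⟨kb, hkb, rfl⟩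
  simp only at hlt ⊢
  have hkab : ka < kb := by omega
  intro heq
  rw [show (0 : Int) + (ka : Int) = (ka : Int) by omega,
    pvKeep_natCast l ka _ hka rfl] at hak
  have hnd : l[ka] ∉ l.drop (ka + 1) := by
    have := (Bool.and_eq_true _ _).mp hak
    simpa using this.2
  apply hnd
  have hlen : kb - (ka + 1) < (l.drop (ka + 1)).length := by
    rw [List.length_drop]; omega
  have : (l.drop (ka + 1))[kb - (ka + 1)] = l[kb] := by
    rw [List.getElem_drop]
    congr 1; omega
  rw [heq, ← this]
  exact List.getElem_mem hlen

theorem filter_keep_append (l : List Char) (c : Char) :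
    (PySem.List.enumerate l 0).filter
        (fun ic => pvKeep (pvCnt (l ++ [c])) (pvLast (l ++ [c])) ic.1 ic.2)
      = (PySem.List.enumerate l 0).filter
        (fun ic => (ic.2 != c) && pvKeep (pvCnt l) (pvLast l) ic.1 ic.2) := by
  apply List.filter_congr
  intro ic hin
  rcases (PySem.List.mem_enumerate_iff _ _ _).mp hin with ⟨k, hk, rfl⟩
  simp only
  have hk' : k < (l ++ [c]).length := by simp; omega
  have hc' : (l ++ [c])[k] = l[k] := List.getElem_append_left hk
  rw [show (0 : Int) + (k : Int) = (k : Int) by omega,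
    pvKeep_natCast (l ++ [c]) k _ hk' hc', pvKeep_natCast l k _ hk rfl,
    drop_append_char l c k hk]
  by_cases hdc : l[k] = c
  · subst hdc
    simp
  · rw [List.count_append, List.contains_append]
    simp [hdc, Ne.symm hdc, bne]

theorem pvG_append (l : List Char) (c : Char) :
    pvG (l ++ [c]) = (pvG l).filter (fun d => d != c)
      ++ (if l.count c % 2 = 0 then [c] else []) := by
  unfold pvG
  rw [PySem.List.enumerate_append, List.filter_append, List.map_append]
  congr 1
  · rw [filter_keep_append, ← List.filter_filter]
    have := List.filter_map (f := (Prod.snd : Int × Char → Char)) (p := fun d => d != c)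
      (l := (PySem.List.enumerate l 0).filter (fun ic => pvKeep (pvCnt l) (pvLast l) ic.1 ic.2))
    simpa [Function.comp] using this.symm
  · rw [PySem.List.enumerate_cons, PySem.List.enumerate_nil]
    have hk' : l.length < (l ++ [c]).length := by simp
    have hc' : (l ++ [c])[l.length] = c := by
      rw [List.getElem_append_right (by omega)]; simp
    have hidx : (0 : Int) + (l.length : Int) = ((l.length : Nat) : Int) := by omega
    have hkeep : pvKeep (pvCnt (l ++ [c])) (pvLast (l ++ [c])) ((l.length : Nat) : Int) c
        = ((l.count c + 1) % 2 == 1) := by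
      rw [pvKeep_natCast (l ++ [c]) l.length c hk' hc']
      have hdrop : (l ++ [c]).drop (l.length + 1) = [] := by
        apply List.drop_eq_nil_of_le; simp
      rw [hdrop, List.count_append]
      simp
    by_cases h : l.count c % 2 = 0
    · have h1 : (l.count c + 1) % 2 = 1 := by omega
      simp [hidx, hkeep, h, h1]
    · have h1 : (l.count c + 1) % 2 = 0 := by omega
      simp [hidx, hkeep, h, h1]

-- A's fold equals B's filtered pass, on a string fixed by lowercasing
theorem fold_eq (l : List Char) (h : ∀ c ∈ l, PySem.Chars.lowerChar c = c) :
    l.foldl pvStep [] = pvG l := by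
  induction l using List.reverseRecOn with
  | nil => rfl
  | append_singleton l c ih =>
    have h' : ∀ d ∈ l, PySem.Chars.lowerChar d = d := fun d hd => h d (by simp [hd])
    have hc : PySem.Chars.lowerChar c = c := h c (by simp)
    rw [List.foldl_append, List.foldl_cons, List.foldl_nil, ih h', pvG_append]
    unfold pvStep
    by_cases hmem : c ∈ pvG l
    · have hodd := (mem_pvG_iff l c).mp hmem
      have hcont : (pvG l).contains c = true := by simpa using hmem
      rw [hc, hcont]
      simp only [Bool.not_true, Bool.false_eq_true, if_false, if_true]
      rw [PySem.List.remove?_eq_some_erase (pvG l) c hmem, Option.getD_some,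
        List.Nodup.erase_eq_filter (pvG_nodup l) c]
      have : ¬ l.count c % 2 = 0 := by omega
      simp [this]
    · have heven : l.count c % 2 = 0 := by
        have := (mem_pvG_iff l c).not.mp hmem
        omega
      have hcont : (pvG l).contains c = false := by simpa using hmem
      rw [hcont]
      simp only [Bool.not_false]
      have hfix : (pvG l).filter (fun d => d != c) = pvG l := by
        rw [List.filter_eq_self]
        intro a ha; simp; rintro rfl; exact hmem ha
      rw [hfix]
      simp [heven]

-- ===== VERDICT (by name: the statement is the Claim_ definition above) =====
theorem clean_post_spec : Claim_equal_clean_post := by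
  intro post _
  unfold Spec_clean_post clean_post clean_post_alt
  by_cases hp : PySem.Str.lower post = ""
  · simp [hp, PySem.List.enumerate_nil]
  · have hbeq : (PySem.Str.lower post == "") = false := by simpa using hp
    simp only [hbeq, Bool.false_eq_true, if_false]
    apply congrArg String.ofList
    apply fold_eq
    intro c hcmem
    rw [PySem.Str.toList_lower] at hcmem
    rcases List.mem_map.mp hcmem with ⟨d, _, rfl⟩
    exact lowerChar_idem d
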